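-- pv_equiv track=rewrite | github.com/tparkeressig/ProFacts | proline.py | scan
-- ===== SOURCE A (Python) =====
-- def scan(text, letter, threshold):
--     sum = 0
--     while text:
--         section = text[0:19]
--         if section.count('P') >= threshold:
--             sum += 1
--         text = text[1:]
--     return sum
-- ===== SOURCE B (Python) =====
-- def scan(text, letter, threshold):
--     n = len(text)
--     pre = [0]
--     run = 0
--     for ch in text:
--         if ch == 'P':
--             run += 1
--         pre.append(run)
--     total = 0
--     for i in range(n):
--         if pre[min(i + 19, n)] - pre[i] >= threshold:
--             total += 1
--     return total
-- ===== Notes on version B (the rewrite author's own statement) =====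
-- stated objective: faster
-- what changed: Replaces A's repeated re-slicing of the whole string (text[1:]) and per-window .count with a single prefix-sum pass of 'P' counts and one index loop reading each window's count as a difference of two prefix sums.
import Mathlib
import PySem

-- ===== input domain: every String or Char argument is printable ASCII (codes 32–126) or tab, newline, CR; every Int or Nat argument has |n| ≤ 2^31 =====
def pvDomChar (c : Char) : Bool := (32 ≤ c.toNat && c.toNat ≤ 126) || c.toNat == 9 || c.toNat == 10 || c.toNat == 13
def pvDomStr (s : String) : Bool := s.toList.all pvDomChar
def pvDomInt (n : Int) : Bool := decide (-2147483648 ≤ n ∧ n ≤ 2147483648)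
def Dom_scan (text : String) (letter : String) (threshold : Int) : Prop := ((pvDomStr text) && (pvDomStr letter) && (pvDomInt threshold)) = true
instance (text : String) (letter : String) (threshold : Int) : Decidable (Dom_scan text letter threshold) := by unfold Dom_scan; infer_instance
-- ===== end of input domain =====

-- B replaces A's repeated whole-string re-slicing and per-window count with one
-- prefix-sum pass and one index loop (window count = difference of prefix sums).

-- ===== PORT A =====
-- while text: look at text[0:19], count 'P' substrings, then text = text[1:]
def scanAGo (threshold : Int) : List Char → Int → Int
  | [], s => s
  | c :: rest, s =>
      scanAGo threshold rest
        (if threshold ≤ ((PySem.Chars.count (PySem.List.slice (c :: rest) (some 0) (some 19)) ['P'] : Nat) : Int)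
         then s + 1 else s)

def scan (text : String) (letter : String) (threshold : Int) : Int :=
  scanAGo threshold text.toList 0

-- ===== PORT B =====
-- running count of 'P', appended to the prefix list pre (Source B's first loop)
def buildPre : List Char → Int → List Int
  | [], _ => []
  | c :: rest, run =>
      let run' := if c == 'P' then run + 1 else run
      run' :: buildPre rest run'

def scan_alt (text : String) (letter : String) (threshold : Int) : Int :=
  let l := text.toList
  let n := l.length
  let pre : List Int := 0 :: buildPre l 0
  (List.range n).foldl
    (fun total i =>
      if threshold ≤ pre.getD (min (i + 19) n) 0 - pre.getD i 0 then total + 1 else total) 0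

-- ===== PRECONDITION & SPEC =====
def Spec_scan (text : String) (letter : String) (threshold : Int) (out : Int) : Prop := out = scan_alt text letter threshold
instance (text : String) (letter : String) (threshold : Int) (out : Int) : Decidable (Spec_scan text letter threshold out) := by unfold Spec_scan; infer_instance

-- ===== CLAIM (what is proved, stated in full; the proofs are below) =====
def Claim_equal_scan : Prop := ∀ (text : String) (letter : String) (threshold : Int), Dom_scan text letter threshold → Spec_scan text letter threshold (scan text letter threshold)

-- ===== LEMMAS AND PROOFS =====

-- PySem.Chars.count with a one-character needle is plain character count
lemma count_go_singleton (c : Char) :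
    ∀ (l : List Char) (fuel acc : Nat), l.length ≤ fuel →
      PySem.Chars.count.go [c] fuel l acc = acc + l.count c := by
  intro l
  induction l with
  | nil =>
      intro fuel acc _
      cases fuel <;> simp [PySem.Chars.count.go]
  | cons h t ih =>
      intro fuel acc hf
      cases fuel with
      | zero => simp at hf
      | succ f =>
          rw [PySem.Chars.count.go]
          by_cases hc : h = c
          · subst hc
            simp only [List.isPrefixOf, List.isPrefixOf_nil_left, beq_self_eq_true,
              Bool.true_and, if_pos]
            simp only [List.length, List.drop_succ_cons, List.drop_zero]
            rw [ih f (acc + 1) (by simpa using hf)]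
            simp [List.count_cons]
            omega
          · have : ([c].isPrefixOf (h :: t)) = false := by
              simp [List.isPrefixOf]
              exact fun h' => absurd h'.symm hc
            rw [this]
            simp only [Bool.false_eq_true, if_false]
            rw [ih f acc (by simpa using hf)]
            simp [List.count_cons, hc]

lemma count_singleton (c : Char) (l : List Char) :
    PySem.Chars.count l [c] = l.count c := by
  have h := count_go_singleton c l l.length 0 le_rfl
  rw [PySem.Chars.count]
  simpa using h

-- prefix list: entry i of (run :: buildPre l run) is run + count of 'P' in the first i chars
lemma pre_getD (l : List Char) :
    ∀ (a : Int) (i : Nat), i ≤ l.length →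
      (a :: buildPre l a).getD i 0 = a + ((l.take i).count 'P' : Int) := by
  induction l with
  | nil =>
      intro a i hi
      have h0 : i = 0 := Nat.le_zero.mp hi
      subst h0
      simp
  | cons c rest ih =>
      intro a i hi
      cases i with
      | zero => simp
      | succ j =>
          simp only [buildPre, List.getD_cons_succ]
          have hj : j ≤ rest.length := by simpa using hi
          rw [ih (if c == 'P' then a + 1 else a) j hj]
          by_cases hc : c = 'P' <;>
            simp [hc, List.count_cons] <;> ring

-- the window predicate both programs decide at index i
def winP (l : List Char) (t : Int) (i : Nat) : Bool :=
  decide (t ≤ (((l.drop i).take 19).count 'P' : Int))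

-- A computes s + (number of indices i < |l| whose window passes)
lemma scanAGo_eq (t : Int) :
    ∀ (l : List Char) (s : Int),
      scanAGo t l s = s + ((List.range l.length).countP (winP l t) : Int) := by
  intro l
  induction l with
  | nil => intro s; simp [scanAGo]
  | cons c rest ih =>
      intro s
      rw [scanAGo, ih]
      have hslice : PySem.List.slice (c :: rest) (some 0) (some 19)
          = (c :: rest).take 19 := by
        rw [PySem.List.slice_toNat _ (by norm_num) (by norm_num)]
        simp
      have hrange : (List.range (rest.length + 1)).countP (winP (c :: rest) t)
          = (if winP (c :: rest) t 0 then 1 else 0)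
            + (List.range rest.length).countP (winP rest t) := by
        rw [List.range_succ_eq_map, List.countP_cons, List.countP_map]
        have : (winP (c :: rest) t ∘ fun i => i + 1) = winP rest t := by
          funext i
          simp [winP, Function.comp]
        rw [this]
        omega
      have hw0 : winP (c :: rest) t 0 = decide (t ≤ (((c :: rest).take 19).count 'P' : Int)) := by
        simp [winP]
      simp only [List.length_cons, hrange, hslice, count_singleton, hw0,
        decide_eq_true_eq]
      by_cases h : t ≤ (((c :: rest).take 19).count 'P' : Int)
      · simp only [if_pos h]
        push_cast
        ring
      · simp only [if_neg h]
        ring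

-- B's prefix-sum difference at i < n is exactly the window count
lemma pre_diff (l : List Char) (i : Nat) (hi : i < l.length) :
    (0 :: buildPre l 0 : List Int).getD (min (i + 19) l.length) 0
      - (0 :: buildPre l 0 : List Int).getD i 0
      = (((l.drop i).take 19).count 'P' : Int) := by
  rw [pre_getD l 0 _ (min_le_right _ _), pre_getD l 0 i (le_of_lt hi)]
  have htake : l.take (min (i + 19) l.length) = l.take (i + 19) := by
    rcases le_total (i + 19) l.length with h | h
    · rw [min_eq_left h]
    · rw [min_eq_right h, List.take_length, List.take_of_length_le h]
  rw [htake, List.take_add, List.count_append]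
  push_cast
  ring

-- ===== VERDICT (by name: the statement is the Claim_ definition above) =====
theorem scan_spec : Claim_equal_scan := by
  intro text letter threshold _
  unfold Spec_scan scan scan_alt
  rw [scanAGo_eq]
  rw [PySem.List.foldl_ite_add_one
    (p := fun i => threshold ≤ (0 :: buildPre text.toList 0 : List Int).getD (min (i + 19) text.toList.length) 0
      - (0 :: buildPre text.toList 0 : List Int).getD i 0)]
  rw [zero_add]
  push_cast
  congr 1
  rw [Nat.zero_add]
  apply List.countP_congr
  intro i hi
  have hi' : i < text.toList.length := List.mem_range.mp hi
  have hd := pre_diff text.toList i hi'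
  simp only [winP, decide_eq_true_eq, List.getD_eq_getElem?_getD] at hd ⊢
  rw [hd]
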